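-- pv_equiv track=rewrite | github.com/louis-she/ai4code | ai4code/utils.py | adjust_sequences
-- ===== SOURCE A (Python) =====
-- def adjust_sequences(sequences, max_len):
--     length_of_seqs = [len(seq) for seq in sequences]
--     total_len = sum(length_of_seqs)
--     cut_off = total_len - max_len
--     if cut_off <= 0:
--         return sequences, length_of_seqs
--
--     for _ in range(cut_off):
--         max_index = length_of_seqs.index(max(length_of_seqs))
--         length_of_seqs[max_index] -= 1
--     sequences = [sequences[i][:l] for i, l in enumerate(length_of_seqs)]
--
--     return sequences, length_of_seqs
-- ===== SOURCE B (Python) =====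
-- def adjust_sequences(sequences, max_len):
--     lengths = [len(seq) for seq in sequences]
--     total = sum(lengths)
--     if total <= max_len:
--         return sequences, lengths
--     # water-filling: find the minimal waterline L with sum(min(l, L)) >= max_len
--     srt = sorted(lengths)
--     n = len(srt)
--     pre = 0
--     L = 0
--     r = 0
--     for j in range(n):
--         v = srt[j]
--         rem = n - j
--         # minimal L0 with pre + rem*L0 >= max_len  (ceil division)
--         L0 = -((pre - max_len) // rem)
--         if L0 <= v:
--             L = L0
--             r = pre + rem * L0 - max_len
--             break
--         pre += v
--     # clip every length to L; the first r sequences at the waterline lose one more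
--     new_lengths = []
--     for l in lengths:
--         v = L if l >= L else l
--         if r > 0 and l >= L:
--             v -= 1
--             r -= 1
--         new_lengths.append(v)
--     new_sequences = [seq[:l] for seq, l in zip(sequences, new_lengths)]
--     return new_sequences, new_lengths
-- ===== Notes on version B (the rewrite author's own statement) =====
-- stated objective: faster
-- what changed: A removes one token at a time from the currently longest sequence (list.index(max(...)) inside a loop run cut_off times); B computes the final lengths directly by water-filling: sort the lengths, scan once for the minimal waterline L with sum(min(l,L)) >= max_len, clip every length to L and give the leftover r decrements to the leftmost sequences at the waterline.
import Mathlib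
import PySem

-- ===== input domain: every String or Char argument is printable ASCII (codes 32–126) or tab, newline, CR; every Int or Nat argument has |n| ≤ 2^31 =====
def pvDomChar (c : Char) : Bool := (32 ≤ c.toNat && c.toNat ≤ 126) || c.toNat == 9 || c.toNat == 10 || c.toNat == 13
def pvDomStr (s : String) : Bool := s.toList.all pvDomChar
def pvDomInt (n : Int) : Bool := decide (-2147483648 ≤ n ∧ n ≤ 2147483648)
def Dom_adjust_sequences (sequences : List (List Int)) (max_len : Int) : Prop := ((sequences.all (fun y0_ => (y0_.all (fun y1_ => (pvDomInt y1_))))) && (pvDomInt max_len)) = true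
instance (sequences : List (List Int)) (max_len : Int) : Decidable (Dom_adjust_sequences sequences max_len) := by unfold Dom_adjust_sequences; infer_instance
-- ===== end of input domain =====

-- B replaces A's one-decrement-at-a-time loop (O(cut_off·n)) by a sorted water-filling
-- computation of the final lengths (O(n log n)); return values agree on all of Pre_.

-- ===== PORT A =====
-- ls[ls.index(m)] -= 1  (the in-place decrement at the first index of m)
def pvModFirst (s : List Int) (m : Int) : List Int :=
  match PySem.List.index? s m with
  | none => s             -- unreachable: m is always a member when called
  | some i => PySem.List.pySetD s (i : Int) (PySem.List.pyGetD s (i : Int) 0 - 1)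

-- one iteration of A's loop: length_of_seqs[length_of_seqs.index(max(length_of_seqs))] -= 1
def pvDecStep (ls : List Int) : List Int :=
  match PySem.List.max? ls (fun y => y) with
  | none => ls            -- unreachable under Pre_ (Python: max([]) raises ValueError)
  | some m => pvModFirst ls m

def adjust_sequences (sequences : List (List Int)) (max_len : Int) : List (List Int) × List Int :=
  let length_of_seqs := sequences.map (fun seq => (seq.length : Int))
  let total_len := length_of_seqs.sum
  let cut_off := total_len - max_len
  if cut_off ≤ 0 then (sequences, length_of_seqs)
  else
    let ls := (PySem.List.pyRange 0 cut_off 1).foldl (fun s _ => pvDecStep s) length_of_seqs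
    let seqs := (PySem.List.enumerate ls 0).map
      (fun p => PySem.List.slice (PySem.List.pyGetD sequences p.1 []) none (some p.2))
    (seqs, ls)

-- ===== PORT B =====
-- scan of the sorted lengths: minimal waterline L with sum(min(l,L)) >= max_len, and leftover r
def pvFindL : List Int → Int → Int → Int × Int
  | [], _, _ => (0, 0)
  | v :: rest, pre, t =>
    let rem : Int := ((v :: rest).length : Int)
    let L0 := -(PySem.Int.floordiv (pre - t) rem)
    if L0 ≤ v then (L0, pre + rem * L0 - t)
    else pvFindL rest (pre + v) t

-- clip each length to the waterline; the first r at the waterline lose one more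
def pvClip : List Int → Int → Int → List Int
  | [], _, _ => []
  | l :: rest, L, r =>
    let v := if l ≥ L then L else l
    if r > 0 ∧ l ≥ L then (v - 1) :: pvClip rest L (r - 1)
    else v :: pvClip rest L r

def adjust_sequences_alt (sequences : List (List Int)) (max_len : Int) : List (List Int) × List Int :=
  let lengths := sequences.map (fun seq => (seq.length : Int))
  let total := lengths.sum
  if total ≤ max_len then (sequences, lengths)
  else
    let srt := PySem.List.sorted lengths (fun x => x) false
    let Lr := pvFindL srt 0 max_len
    let new_lengths := pvClip lengths Lr.1 Lr.2
    let new_sequences := (sequences.zip new_lengths).map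
      (fun p => PySem.List.slice p.1 none (some p.2))
    (new_sequences, new_lengths)

-- ===== PRECONDITION & SPEC =====
-- Pre_ excludes only the inputs where A raises: empty `sequences` with negative max_len
-- (then cut_off > 0 and Python's max([]) raises ValueError).
def Pre_adjust_sequences (sequences : List (List Int)) (max_len : Int) : Prop :=
  sequences ≠ [] ∨ 0 ≤ max_len
instance (sequences : List (List Int)) (max_len : Int) : Decidable (Pre_adjust_sequences sequences max_len) := by unfold Pre_adjust_sequences; infer_instance
def pvWitness_adjust_sequences : List (List Int) × Int := ([[1, 2, 3], [4, 5], [6]], 4)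

def Spec_adjust_sequences (sequences : List (List Int)) (max_len : Int) (out : List (List Int) × List Int) : Prop := out = adjust_sequences_alt sequences max_len
instance (sequences : List (List Int)) (max_len : Int) (out : List (List Int) × List Int) : Decidable (Spec_adjust_sequences sequences max_len out) := by unfold Spec_adjust_sequences; infer_instance

-- ===== CLAIM (what is proved, stated in full; the proofs are below) =====
def Claim_equal_adjust_sequences : Prop := ∀ (sequences : List (List Int)) (max_len : Int), Dom_adjust_sequences sequences max_len → Pre_adjust_sequences sequences max_len → Spec_adjust_sequences sequences max_len (adjust_sequences sequences max_len)

-- ===== LEMMAS AND PROOFS =====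

-- water level bookkeeping: pvF ls L = sum of min(l, L); pvCnt ls L = #{l ≥ L}
def pvF : List Int → Int → Int
  | [], _ => 0
  | x :: xs, L => min x L + pvF xs L

def pvCnt : List Int → Int → Int
  | [], _ => 0
  | x :: xs, L => (if L ≤ x then 1 else 0) + pvCnt xs L

lemma pvCnt_nonneg (ls : List Int) (L : Int) : 0 ≤ pvCnt ls L := by
  induction ls with
  | nil => simp [pvCnt]
  | cons x xs ih => simp only [pvCnt]; split <;> omega

lemma pvF_mono (ls : List Int) {L1 L2 : Int} (h : L1 ≤ L2) : pvF ls L1 ≤ pvF ls L2 := by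
  induction ls with
  | nil => simp [pvF]
  | cons x xs ih => simp only [pvF]; omega

lemma pvF_sub (ls : List Int) (L : Int) : pvF ls L = pvF ls (L - 1) + pvCnt ls L := by
  induction ls with
  | nil => simp [pvF, pvCnt]
  | cons x xs ih => simp only [pvF, pvCnt]; split <;> omega

lemma pvCnt_mono (ls : List Int) {L1 L2 : Int} (h : L1 ≤ L2) : pvCnt ls L2 ≤ pvCnt ls L1 := by
  induction ls with
  | nil => simp [pvCnt]
  | cons x xs ih => simp only [pvCnt]; split <;> split <;> omega

lemma pvF_perm {a b : List Int} (h : a.Perm b) (L : Int) : pvF a L = pvF b L := by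
  induction h with
  | nil => rfl
  | cons x _ ih => simp [pvF, ih]
  | swap x y l => simp [pvF]; omega
  | trans _ _ ih1 ih2 => omega

lemma pvCnt_perm {a b : List Int} (h : a.Perm b) (L : Int) : pvCnt a L = pvCnt b L := by
  induction h with
  | nil => rfl
  | cons x _ ih => simp [pvCnt, ih]
  | swap x y l => simp [pvCnt]; omega
  | trans _ _ ih1 ih2 => omega

lemma pvF_append (a b : List Int) (L : Int) : pvF (a ++ b) L = pvF a L + pvF b L := by
  induction a with
  | nil => simp [pvF]
  | cons x xs ih => simp [pvF, ih]; omega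

-- region formula: below the suffix and above the prefix, pvF is pre + rem·L
lemma pvF_eq_sum (ls : List Int) (L : Int) (h : ∀ a ∈ ls, a ≤ L) : pvF ls L = ls.sum := by
  induction ls with
  | nil => simp [pvF]
  | cons x xs ih =>
    have hx := h x (by simp)
    have := ih (fun a ha => h a (by simp [ha]))
    simp only [pvF, List.sum_cons]
    omega

lemma pvF_eq_len (ls : List Int) (L : Int) (h : ∀ b ∈ ls, L ≤ b) : pvF ls L = (ls.length : Int) * L := by
  induction ls with
  | nil => simp [pvF]
  | cons x xs ih =>
    have hx := h x (by simp)
    have hih := ih (fun b hb => h b (by simp [hb]))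
    simp only [pvF, List.length_cons]
    push_cast
    rw [hih]
    have : min x L = L := by omega
    rw [this]; ring

lemma pvCnt_pos_of_mem {ls : List Int} {L x : Int} (hx : x ∈ ls) (hle : L ≤ x) : 0 < pvCnt ls L := by
  induction ls with
  | nil => simp at hx
  | cons y ys ih =>
    rcases List.mem_cons.mp hx with h | h
    · subst h; have := pvCnt_nonneg ys L; simp only [pvCnt]; rw [if_pos hle]; omega
    · have := ih h; simp only [pvCnt]; split <;> omega

lemma pvF_split (pfx sfx : List Int) (L : Int)
    (hA : ∀ a ∈ pfx, a ≤ L) (hB : ∀ b ∈ sfx, L ≤ b) :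
    pvF (pfx ++ sfx) L = pfx.sum + (sfx.length : Int) * L := by
  rw [pvF_append, pvF_eq_sum pfx L hA, pvF_eq_len sfx L hB]

lemma pvGood_unique {ls : List Int} {t L1 r1 L2 r2 : Int}
    (h1 : pvF ls L1 - r1 = t ∧ 0 ≤ r1 ∧ r1 < pvCnt ls L1)
    (h2 : pvF ls L2 - r2 = t ∧ 0 ≤ r2 ∧ r2 < pvCnt ls L2) : L1 = L2 ∧ r1 = r2 := by
  obtain ⟨e1, hr1, hc1⟩ := h1
  obtain ⟨e2, hr2, hc2⟩ := h2
  have s1 := pvF_sub ls L1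
  have s2 := pvF_sub ls L2
  have hL : L1 = L2 := by
    rcases lt_trichotomy L1 L2 with h | h | h
    · have := pvF_mono ls (show L1 ≤ L2 - 1 by omega); omega
    · exact h
    · have := pvF_mono ls (show L2 ≤ L1 - 1 by omega); omega
  subst hL
  omega

-- pvClip facts
lemma pvClip_length (ls : List Int) (L r : Int) : (pvClip ls L r).length = ls.length := by
  induction ls generalizing r with
  | nil => rfl
  | cons x xs ih => simp only [pvClip]; split <;> simp [ih]

lemma pvClip_zero (ls : List Int) (L : Int) : pvClip ls L 0 = ls.map (fun x => min x L) := by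
  induction ls with
  | nil => rfl
  | cons x xs ih =>
    simp only [pvClip, List.map_cons]
    rw [if_neg (by omega)]
    rw [ih]
    congr 1
    split <;> omega

lemma pvClip_id (ls : List Int) (L : Int) (h : ∀ x ∈ ls, x ≤ L) : pvClip ls L 0 = ls := by
  rw [pvClip_zero]
  conv_rhs => rw [← List.map_id ls]
  exact List.map_congr_left (fun a ha => by have := h a ha; simp; omega)

lemma pvClip_all (ls : List Int) (L : Int) : pvClip ls L (pvCnt ls L) = pvClip ls (L - 1) 0 := by
  induction ls with
  | nil => rfl
  | cons x xs ih =>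
    have hnn := pvCnt_nonneg xs L
    simp only [pvClip, pvCnt]
    split_ifs with h1 h2 h3 h4 h5 h6 h7 <;>
      simp only [List.cons.injEq, true_and] <;>
      try refine ⟨by omega, ?_⟩
    all_goals
      first
        | omega
        | (rw [show (1 + pvCnt xs L - 1) = pvCnt xs L from by omega]; exact ih)
        | (rw [show ((0:Int) + pvCnt xs L) = pvCnt xs L from by omega]; exact ih)

lemma mem_pvClip_le {ls : List Int} {L r x : Int} (hx : x ∈ pvClip ls L r) : x ≤ L := by
  induction ls generalizing r with
  | nil => simp [pvClip] at hx
  | cons y ys ih =>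
    simp only [pvClip] at hx
    split at hx
    · rcases List.mem_cons.mp hx with h | h
      · subst h; split <;> omega
      · exact ih h
    · rcases List.mem_cons.mp hx with h | h
      · subst h; split <;> omega
      · exact ih h

lemma mem_pvClip_self {ls : List Int} {L r : Int} (hr : 0 ≤ r) (hlt : r < pvCnt ls L) :
    L ∈ pvClip ls L r := by
  induction ls generalizing r with
  | nil => simp [pvCnt] at hlt; omega
  | cons x xs ih =>
    simp only [pvCnt] at hlt
    by_cases hx : L ≤ x
    · rw [if_pos hx] at hlt
      by_cases hr0 : 0 < r
      · simp only [pvClip]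
        rw [if_pos ⟨hr0, hx⟩]
        exact List.mem_cons_of_mem _ (ih (by omega) (by omega))
      · have hr' : r = 0 := by omega
        subst hr'
        simp only [pvClip]
        rw [if_neg (by omega)]
        have : (if x ≥ L then L else x) = L := by rw [if_pos hx]
        rw [this]
        exact List.mem_cons_self
    · rw [if_neg hx] at hlt
      simp only [pvClip]
      rw [if_neg (by intro hh; exact hx hh.2)]
      exact List.mem_cons_of_mem _ (ih hr (by omega))

-- one Python loop iteration on a clipped state
lemma clip_cons_dec {x : Int} (xs : List Int) {L r : Int} (hx : L ≤ x) (hr0 : 0 < r) :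
    pvClip (x :: xs) L r = (L - 1) :: pvClip xs L (r - 1) := by
  simp only [pvClip]
  rw [if_pos ⟨hr0, hx⟩]
  congr 1
  rw [if_pos (show x ≥ L from hx)]

lemma clip_cons_keep {x : Int} (xs : List Int) {L : Int} (hx : L ≤ x) :
    pvClip (x :: xs) L 0 = L :: pvClip xs L 0 := by
  simp only [pvClip]
  rw [if_neg (by omega)]
  congr 1
  rw [if_pos (show x ≥ L from hx)]

lemma clip_cons_lt {x : Int} (xs : List Int) {L r : Int} (hx : ¬ L ≤ x) :
    pvClip (x :: xs) L r = x :: pvClip xs L r := by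
  simp only [pvClip]
  rw [if_neg (fun hh => hx hh.2)]
  congr 1
  rw [if_neg (show ¬ x ≥ L from hx)]

lemma pvModFirst_pvClip (ls : List Int) (L r : Int) (hr : 0 ≤ r) (hlt : r < pvCnt ls L) :
    pvModFirst (pvClip ls L r) L = pvClip ls L (r + 1) := by
  induction ls generalizing r with
  | nil => simp only [pvCnt] at hlt; omega
  | cons x xs ih =>
    simp only [pvCnt] at hlt
    by_cases hx : L ≤ x
    · rw [if_pos hx] at hlt
      by_cases hr0 : 0 < r
      · rw [clip_cons_dec xs hx hr0, clip_cons_dec xs hx (by omega)]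
        have heq : r + 1 - 1 = r - 1 + 1 := by omega
        rw [heq]
        have ih' := ih (r - 1) (by omega) (by omega)
        have hmem : L ∈ pvClip xs L (r - 1) := mem_pvClip_self (by omega) (by omega)
        obtain ⟨j, hj⟩ := Option.isSome_iff_exists.mp
          ((PySem.List.index?_isSome_iff _ _).mpr hmem)
        unfold pvModFirst at ih' ⊢
        rw [PySem.List.index?_cons_of_ne _ (show (L - 1) ≠ L by omega), hj]
        rw [hj] at ih'
        simp only [Option.map_some, PySem.List.pySetD_natCast, PySem.List.pyGetD_natCast] at ih' ⊢
        simp only [List.set_cons_succ, List.getD_cons_succ]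
        rw [ih']
      · have hr' : r = 0 := by omega
        subst hr'
        rw [clip_cons_keep xs hx, clip_cons_dec xs hx (by omega)]
        unfold pvModFirst
        rw [PySem.List.index?_cons_self]
        simp only [PySem.List.pySetD_natCast, PySem.List.pyGetD_natCast]
        simp
    · rw [if_neg hx] at hlt
      rw [clip_cons_lt xs hx, clip_cons_lt xs hx]
      have ih' := ih r hr (by omega)
      have hmem : L ∈ pvClip xs L r := mem_pvClip_self hr (by omega)
      obtain ⟨j, hj⟩ := Option.isSome_iff_exists.mp
        ((PySem.List.index?_isSome_iff _ _).mpr hmem)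
      unfold pvModFirst at ih' ⊢
      rw [PySem.List.index?_cons_of_ne _ (show x ≠ L by omega), hj]
      rw [hj] at ih'
      simp only [Option.map_some, PySem.List.pySetD_natCast, PySem.List.pyGetD_natCast] at ih' ⊢
      simp only [List.set_cons_succ, List.getD_cons_succ]
      rw [ih']

lemma pvMax_pvClip (ls : List Int) (L r : Int) (hr : 0 ≤ r) (hlt : r < pvCnt ls L) :
    PySem.List.max? (pvClip ls L r) (fun y => y) = some L := by
  have hmem := mem_pvClip_self hr hlt
  cases h : PySem.List.max? (pvClip ls L r) (fun y => y) with
  | none =>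
    rw [PySem.List.max?_eq_none_iff] at h
    rw [h] at hmem
    simp at hmem
  | some m =>
    have h1 : m ≤ L := mem_pvClip_le (PySem.List.max?_mem h)
    have h2 : L ≤ m := PySem.List.max?_isMax h L hmem
    rw [show m = L by omega]

lemma pvDecStep_pvClip (ls : List Int) (L r : Int) (hr : 0 ≤ r) (hlt : r < pvCnt ls L) :
    pvDecStep (pvClip ls L r) = pvClip ls L (r + 1) := by
  unfold pvDecStep
  rw [pvMax_pvClip ls L r hr hlt]
  exact pvModFirst_pvClip ls L r hr hlt

-- the loop invariant: after k steps the state is a clipped configuration at target sum - k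
lemma pvIter (ls : List Int) (hne : ls ≠ []) (k : Nat) :
    ∃ L r, (pvF ls L - r = ls.sum - (k : Int) ∧ 0 ≤ r ∧ r < pvCnt ls L) ∧
      pvDecStep^[k] ls = pvClip ls L r := by
  induction k with
  | zero =>
    cases h : PySem.List.max? ls (fun y => y) with
    | none => rw [PySem.List.max?_eq_none_iff] at h; exact absurd h hne
    | some M =>
      have hmem := PySem.List.max?_mem h
      have hmax : ∀ y ∈ ls, y ≤ M := PySem.List.max?_isMax h
      refine ⟨M, 0, ⟨?_, le_refl 0, pvCnt_pos_of_mem hmem (le_refl M)⟩, ?_⟩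
      · rw [pvF_eq_sum ls M hmax]; simp
      · simp [Function.iterate_zero, pvClip_id ls M hmax]
  | succ k ih =>
    obtain ⟨L, r, ⟨he, hr, hc⟩, heq⟩ := ih
    rw [Function.iterate_succ_apply', heq, pvDecStep_pvClip ls L r hr hc]
    by_cases hrc : r + 1 < pvCnt ls L
    · exact ⟨L, r + 1, ⟨by push_cast; omega, by omega, hrc⟩, rfl⟩
    · have hfull : r + 1 = pvCnt ls L := by omega
      refine ⟨L - 1, 0, ⟨?_, le_refl 0, ?_⟩, ?_⟩
      · have := pvF_sub ls L; push_cast; omega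
      · have := pvCnt_mono ls (show L - 1 ≤ L by omega); omega
      · rw [hfull, pvClip_all]

-- correctness of B's sorted scan
lemma pvFindL_spec (sfx : List Int) : ∀ (pfx : List Int) (t : Int),
    (pfx ++ sfx).Pairwise (· ≤ ·) → pfx ++ sfx ≠ [] →
    (∀ a ∈ pfx, pfx.sum + (sfx.length : Int) * a < t) →
    t < pfx.sum + sfx.sum →
    pvF (pfx ++ sfx) (pvFindL sfx pfx.sum t).1 - (pvFindL sfx pfx.sum t).2 = t ∧
      0 ≤ (pvFindL sfx pfx.sum t).2 ∧
      (pvFindL sfx pfx.sum t).2 < pvCnt (pfx ++ sfx) (pvFindL sfx pfx.sum t).1 := by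
  induction sfx with
  | nil =>
    intro pfx t hpw hne h3 hlt
    exfalso
    simp only [List.length_nil, List.sum_nil, add_zero] at h3 hlt
    have hpne : pfx ≠ [] := by simpa using hne
    obtain ⟨a, ha⟩ := List.exists_mem_of_ne_nil pfx hpne
    have := h3 a ha
    simp at this
    omega
  | cons v rest ih =>
    intro pfx t hpw hne h3 hlt
    simp only [pvFindL]
    obtain ⟨hp_pfx, hp_sfx, hp_cross⟩ := List.pairwise_append.mp hpw
    obtain ⟨hv_rest, hp_rest⟩ := List.pairwise_cons.mp hp_sfx
    set rem : Int := ((v :: rest).length : Int) with hrem_def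
    set L0 : Int := -(PySem.Int.floordiv (pfx.sum - t) rem) with hL0_def
    have hrem : (0:Int) < rem := by rw [hrem_def]; simp
    have hremeq : rem = (rest.length : Int) + 1 := by rw [hrem_def]; simp
    have hkey : -(PySem.Int.floordiv (-(t - pfx.sum)) rem) = L0 := by rw [neg_sub]
    obtain ⟨hlb, hub⟩ :=
      (PySem.Int.neg_floordiv_neg_eq_iff_of_pos hrem).mp hkey
    split_ifs with hbr
    · have hA : ∀ a ∈ pfx, a ≤ L0 - 1 := by
        intro a ha
        have h3a := h3 a ha
        by_contra hcon
        have hLa : L0 ≤ a := by omega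
        have hsc : L0 * rem ≤ a * rem := mul_le_mul_of_nonneg_right hLa (le_of_lt hrem)
        have hcm : rem * a = a * rem := mul_comm _ _
        linarith
      have hB : ∀ b ∈ v :: rest, L0 ≤ b := by
        intro b hb
        rcases List.mem_cons.mp hb with h | h
        · omega
        · exact le_trans hbr (hv_rest b h)
      have hFL : pvF (pfx ++ v :: rest) L0 = pfx.sum + rem * L0 := by
        rw [pvF_split pfx _ L0 (fun a ha => by have := hA a ha; omega) hB, ← hrem_def,
          mul_comm]
      have hFL1 : pvF (pfx ++ v :: rest) (L0 - 1) = pfx.sum + rem * (L0 - 1) := by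
        rw [pvF_split pfx _ (L0 - 1) hA (fun b hb => by have := hB b hb; omega), ← hrem_def,
          mul_comm]
      have hsub := pvF_sub (pfx ++ v :: rest) L0
      have hcm1 : (L0 - 1) * rem = rem * (L0 - 1) := mul_comm _ _
      have hcm2 : L0 * rem = rem * L0 := mul_comm _ _
      refine ⟨by simp only; linarith, by simp only; linarith, by simp only; linarith⟩
    · have hvlt : v < L0 := by omega
      have hscale : rem * v ≤ rem * (L0 - 1) := mul_le_mul_of_nonneg_left (by omega) (le_of_lt hrem)
      have hcm1 : (L0 - 1) * rem = rem * (L0 - 1) := mul_comm _ _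
      have hv_t : pfx.sum + rem * v < t := by linarith
      have happ : (pfx ++ [v]) ++ rest = pfx ++ v :: rest := by simp
      have hsum2 : (pfx ++ [v]).sum = pfx.sum + v := by simp
      have I3' : ∀ a ∈ pfx ++ [v], (pfx ++ [v]).sum + ((rest.length : Int)) * a < t := by
        intro a ha
        have hav : a ≤ v := by
          rcases List.mem_append.mp ha with h | h
          · exact hp_cross a h v List.mem_cons_self
          · simp at h; omega
        have hsc2 : (rest.length : Int) * a ≤ (rest.length : Int) * v :=
          mul_le_mul_of_nonneg_left hav (by positivity)
        have hexp : rem * v = (rest.length : Int) * v + v := by rw [hremeq]; ring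
        rw [hsum2]
        linarith
      have hres := ih (pfx ++ [v]) t (by rw [happ]; exact hpw) (by simp) I3'
        (by rw [hsum2]; simp only [List.sum_cons] at hlt; linarith)
      rw [happ, hsum2] at hres
      exact hres

-- folds / glue
lemma foldl_const {β : Type} (f : List Int → List Int) (l : List β) (s : List Int) :
    l.foldl (fun s _ => f s) s = f^[l.length] s := by
  induction l generalizing s with
  | nil => rfl
  | cons x xs ih => simp [List.foldl_cons, ih, Function.iterate_succ_apply]

lemma enum_zip_map (xs : List (List Int)) (nl : List Int) (h : nl.length = xs.length) :
    (PySem.List.enumerate nl 0).map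
      (fun p => PySem.List.slice (PySem.List.pyGetD xs p.1 []) none (some p.2)) =
    (xs.zip nl).map (fun p => PySem.List.slice p.1 none (some p.2)) := by
  apply List.ext_getElem
  · simp [PySem.List.length_enumerate, h]
  · intro i h1 h2
    have hi : i < xs.length := by
      simp only [List.length_map, PySem.List.length_enumerate] at h1
      omega
    simp only [List.getElem_map, PySem.List.getElem_enumerate, List.getElem_zip]
    congr 1
    rw [zero_add, PySem.List.pyGetD_natCast]
    exact List.getD_eq_getElem xs [] hi

-- ===== VERDICT (by name: the statement is the Claim_ definition above) =====
theorem adjust_sequences_spec : Claim_equal_adjust_sequences := by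
  intro seqs ml hdom hpre
  unfold Spec_adjust_sequences
  simp only [adjust_sequences, adjust_sequences_alt]
  by_cases hc : (seqs.map (fun seq => ((seq.length : Int)))).sum ≤ ml
  · rw [if_pos (by omega), if_pos hc]
  · rw [if_neg (by omega), if_neg hc]
    set lengths := seqs.map (fun seq => ((seq.length : Int))) with hlen_def
    have hlen : lengths.length = seqs.length := by rw [hlen_def]; simp
    have hne : lengths ≠ [] := by
      intro h0
      have hs0 : seqs = [] := by
        rw [hlen_def] at h0
        exact List.map_eq_nil_iff.mp h0
      rcases hpre with hp | hp
      · exact hp hs0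
      · rw [h0] at hc; simp at hc; omega
    have hfold : (PySem.List.pyRange 0 (lengths.sum - ml) 1).foldl (fun s _ => pvDecStep s)
        lengths = pvDecStep^[(lengths.sum - ml).toNat] lengths := by
      rw [foldl_const]
      congr 1
      rw [PySem.List.length_pyRange_one]
      simp
    obtain ⟨LA, rA, goodA, heqA⟩ := pvIter lengths hne (lengths.sum - ml).toNat
    have hcast : (((lengths.sum - ml).toNat : Int)) = lengths.sum - ml :=
      Int.toNat_of_nonneg (by omega)
    rw [hcast] at goodA
    have goodA' : pvF lengths LA - rA = ml ∧ 0 ≤ rA ∧ rA < pvCnt lengths LA := by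
      refine ⟨?_, goodA.2.1, goodA.2.2⟩
      have := goodA.1
      omega
    set srt := PySem.List.sorted lengths (fun x => x) false with hsrt_def
    have hperm : srt.Perm lengths := PySem.List.sorted_perm lengths (fun x => x) false
    have hpw : srt.Pairwise (· ≤ ·) := by
      have := PySem.List.sorted_pairwise lengths (fun x => x)
      simpa using this
    have hsum : srt.sum = lengths.sum := hperm.sum_eq
    have hsne : srt ≠ [] := by
      rw [Ne, PySem.List.sorted_eq_nil_iff]
      exact hne
    have hspec := pvFindL_spec srt [] ml (by simpa using hpw) (by simpa using hsne)
      (by simp) (by simp only [List.sum_nil, zero_add]; omega)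
    simp only [List.nil_append, List.sum_nil] at hspec
    have goodB : pvF lengths (pvFindL srt 0 ml).1 - (pvFindL srt 0 ml).2 = ml ∧
        0 ≤ (pvFindL srt 0 ml).2 ∧
        (pvFindL srt 0 ml).2 < pvCnt lengths (pvFindL srt 0 ml).1 := by
      rw [← pvF_perm hperm, ← pvCnt_perm hperm]
      exact hspec
    obtain ⟨hLeq, hreq⟩ := pvGood_unique goodA' goodB
    have hlists : (PySem.List.pyRange 0 (lengths.sum - ml) 1).foldl (fun s _ => pvDecStep s)
        lengths = pvClip lengths (pvFindL srt 0 ml).1 (pvFindL srt 0 ml).2 := by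
      rw [hfold, heqA, hLeq, hreq]
    rw [hlists]
    rw [enum_zip_map seqs _ (by rw [pvClip_length, hlen])]
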